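-- pv_equiv track=rewrite | github.com/pzhou137/python_questions | binary_circuit.py | get_max_cost
-- ===== SOURCE A (Python) =====
-- def get_max_cost(s: str) -> int:
--     """
--     Calculate the maximum cost of transforming a binary string by moving '1's to the right.
--     Each move of a '1' to an adjacent position costs 1 plus the number of positions moved.
--
--     Args:
--         s (str): A binary string containing '0's and '1's
--
--     Returns:
--         int: The maximum possible cost of moving all '1's to the rightmost positions
--     """
--     # Get the length of the input string
--     n = len(s)
--
--     # Create a list of positions where '1's are located in the input string
--     positions = [i for i in range(n) if s[i] == '1']
--
--     if not positions:
--         return 0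
--
--     max_cost = 0
--
--     # First phase: Process '1's from right to left, moving them as far right as possible
--     # while maintaining their relative order
--     for i in range(len(positions) - 1, 0, -1):
--         # Check if there's a gap between consecutive '1's
--         if positions[i] - positions[i-1] > 1:
--             # Calculate the number of positions to move
--             cost = positions[i] - positions[i-1] - 1
--             # Add cost+1 to total (1 for the move itself plus positions moved)
--             max_cost += cost + 1
--             # Update the position of the '1' that was moved
--             positions[i-1] = positions[i] - 1
--
--     # Second phase: Move all '1's to the rightmost positions
--     # Start from the rightmost position of the string
--     final_position = n - 1
--     for pos in positions:
--         # Calculate how far each '1' needs to move to reach its final position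
--         cost = final_position - pos
--         # Add cost+1 to total (1 for the move itself plus positions moved)
--         max_cost += cost + 1
--         # Update the next available rightmost position
--         final_position -= 1
--
--     return max_cost
-- ===== SOURCE B (Python) =====
-- def get_max_cost(s: str) -> int:
--     positions = [i for i in range(len(s)) if s[i] == '1']
--     if not positions:
--         return 0
--     k = len(positions)
--     last = positions[-1]
--     total = k * (len(s) - last)
--     target = last - k + 2
--     for p in positions[:-1]:
--         gap = target - p
--         if gap > 1:
--             total += gap
--         target += 1
--     return total
-- ===== Notes on version B (the rewrite author's own statement) =====
-- stated objective: simpler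
-- what changed: B replaces A's mutating right-to-left packing pass and the second per-element move pass with one non-mutating forward scan over positions[:-1] against precomputed packed targets plus the closed form k*(len(s)-last) for the second phase.
import Mathlib
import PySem

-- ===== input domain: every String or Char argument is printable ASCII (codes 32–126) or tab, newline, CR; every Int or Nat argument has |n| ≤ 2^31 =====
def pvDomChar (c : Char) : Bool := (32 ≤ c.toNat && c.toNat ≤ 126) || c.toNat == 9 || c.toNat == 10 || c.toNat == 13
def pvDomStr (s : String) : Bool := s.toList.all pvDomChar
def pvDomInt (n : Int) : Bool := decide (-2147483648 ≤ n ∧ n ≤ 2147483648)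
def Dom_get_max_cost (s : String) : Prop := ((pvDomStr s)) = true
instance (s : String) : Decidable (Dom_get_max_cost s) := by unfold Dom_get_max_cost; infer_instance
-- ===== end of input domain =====

-- B replaces A's mutating right-to-left packing pass and second move pass with one
-- non-mutating forward scan against packed targets plus the closed form k*(len(s)-last).


-- ===== PORT A =====
-- A's first loop "for i in range(len(positions)-1, 0, -1)" with in-place updates of
-- positions, as downward structural recursion on the loop counter (always in range).
def pvPhase1 : List Int → Nat → Int → List Int × Int
  | ps, 0, mc => (ps, mc)
  | ps, i+1, mc =>
    let pi := ps.getD (i+1) 0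
    let pim := ps.getD i 0
    if pi - pim > 1 then
      pvPhase1 (ps.set i (pi - 1)) i (mc + (pi - pim - 1) + 1)
    else
      pvPhase1 ps i mc

-- A's second loop "for pos in positions" with state (final_position, max_cost)
def pvPhase2 : List Int → Int → Int → Int
  | [], _, mc => mc
  | p :: rest, fp, mc => pvPhase2 rest (fp - 1) (mc + (fp - p) + 1)

def get_max_cost (s : String) : Int :=
  let n : Int := PySem.Str.len s
  let positions : List Int :=
    (PySem.List.pyRange 0 n 1).filter (fun i => PySem.Str.pyGet? s i == some '1')
  if positions = [] then 0
  else
    let r := pvPhase1 positions (positions.length - 1) 0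
    pvPhase2 r.1 (n - 1) r.2

-- ===== PORT B =====
-- B's single loop "for p in positions[:-1]: gap = target - p; if gap > 1: total += gap; target += 1"
def pvBLoop : List Int → Int → Int → Int
  | [], _, total => total
  | p :: rest, target, total =>
    let gap := target - p
    pvBLoop rest (target + 1) (if gap > 1 then total + gap else total)

def get_max_cost_alt (s : String) : Int :=
  let positions : List Int :=
    (PySem.List.pyRange 0 (PySem.Str.len s) 1).filter (fun i => PySem.Str.pyGet? s i == some '1')
  if positions = [] then 0
  else
    let k : Int := positions.length
    let last : Int := PySem.List.pyGetD positions (-1) 0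
    let total := k * (PySem.Str.len s - last)
    pvBLoop (PySem.List.slice positions none (some (-1))) (last - k + 2) total

-- ===== PRECONDITION & SPEC =====
def Spec_get_max_cost (s : String) (out : Int) : Prop := out = get_max_cost_alt s
instance (s : String) (out : Int) : Decidable (Spec_get_max_cost s out) := by unfold Spec_get_max_cost; infer_instance

-- ===== CLAIM (what is proved, stated in full; the proofs are below) =====
def Claim_equal_get_max_cost : Prop := ∀ (s : String), Dom_get_max_cost s → Spec_get_max_cost s (get_max_cost s)

-- ===== LEMMAS AND PROOFS =====

-- the packed tail [top-m+1, …, top]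
def pvPack : Nat → Int → List Int
  | 0, _ => []
  | m+1, top => (top - m) :: pvPack m top

-- the sum both phase-1 loops compute: gaps to packed targets, counted when > 1
def pvGsum : List Int → Int → Int
  | [], _ => 0
  | p :: rest, t => (if t - p > 1 then t - p else 0) + pvGsum rest (t + 1)

lemma pvBLoop_eq (l : List Int) : ∀ t total, pvBLoop l t total = total + pvGsum l t := by
  induction l with
  | nil => intro t total; simp [pvBLoop, pvGsum]
  | cons p rest ih =>
    intro t total
    simp only [pvBLoop, pvGsum, ih]
    split_ifs <;> ring

lemma pvPhase2_pack (m : Nat) : ∀ (top fp mc : Int),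
    pvPhase2 (pvPack m top) fp mc = mc + m * (fp - top + 1) := by
  induction m with
  | zero => intro top fp mc; simp [pvPack, pvPhase2]
  | succ m ih =>
    intro top fp mc
    simp only [pvPack, pvPhase2, ih]
    push_cast
    ring

lemma pvGsum_snoc (l : List Int) (p : Int) : ∀ t,
    pvGsum (l ++ [p]) t = pvGsum l t +
      (if t + l.length - p > 1 then t + l.length - p else 0) := by
  induction l with
  | nil => intro t; simp [pvGsum]
  | cons q rest ih =>
    intro t
    simp only [List.cons_append, pvGsum, ih, List.length_cons]
    push_cast
    split_ifs <;> omega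

lemma pvGap (P : List Int) (hP : P.Pairwise (· < ·)) :
    ∀ (d i : Nat), i + d < P.length → P.getD i 0 + d ≤ P.getD (i + d) 0 := by
  intro d
  induction d with
  | zero => intro i h; simp
  | succ d ih =>
    intro i h
    have h1 : i + d < P.length := by omega
    have h2 := ih i h1
    have h3 : P.getD (i + d) 0 < P.getD (i + d + 1) 0 := by
      rw [List.getD_eq_getElem P 0 h1, List.getD_eq_getElem P 0 (by omega : i + d + 1 < P.length)]
      exact List.pairwise_iff_getElem.mp hP (i + d) (i + d + 1) h1 (by omega) (by omega)
    have h4 : i + (d + 1) = i + d + 1 := by omega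
    rw [h4]
    push_cast
    omega

lemma pvPhase1_inv (P : List Int) (hP : P.Pairwise (· < ·)) (hne : P ≠ []) (i : Nat)
    (hi : i < P.length) : ∀ mc : Int,
    pvPhase1 (P.take i ++ pvPack (P.length - i) (P.getLast hne)) i mc
      = (pvPack P.length (P.getLast hne),
         mc + pvGsum (P.take i) (P.getLast hne - P.length + 2)) := by
  induction i with
  | zero =>
    intro mc
    simp [pvPhase1, pvGsum]
  | succ i ih =>
    intro mc
    have hk : i + 1 < P.length := hi
    have hm : P.length - (i + 1) = (P.length - i - 2) + 1 := by omega
    have htake : (P.take (i+1)).length = i + 1 := by simp; omega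
    have hsucc : P.take (i+1) = P.take i ++ [P[i]] := by
      rw [List.take_add_one]
      simp [List.getElem?_eq_getElem (by omega : i < P.length)]
    set last := P.getLast hne with hlast
    set m' := P.length - i - 2 with hm'
    -- the two reads
    have hget1 : (P.take (i+1) ++ pvPack (P.length - (i+1)) last).getD (i+1) 0 = last - m' := by
      rw [hm]
      rw [List.getD_append_right _ _ _ _ (by omega)]
      simp [htake, pvPack]
    have hget0 : (P.take (i+1) ++ pvPack (P.length - (i+1)) last).getD i 0 = P[i] := by
      rw [List.getD_append _ _ _ _ (by omega)]
      rw [List.getD_eq_getElem (P.take (i+1)) 0 (by omega : i < (P.take (i+1)).length)]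
      simp
    -- gap is at least 1
    have hgap : P[i] + 1 ≤ last - m' := by
      have := pvGap P hP (P.length - 1 - i) i (by omega)
      rw [List.getD_eq_getElem P 0 (by omega : i < P.length)] at this
      have hlg : P.getD (i + (P.length - 1 - i)) 0 = last := by
        have he : i + (P.length - 1 - i) = P.length - 1 := by omega
        rw [he, List.getD_eq_getElem P 0 (by omega), hlast, List.getLast_eq_getElem]
      rw [hlg] at this
      have hcast : ((P.length - 1 - i : Nat) : Int) = (P.length : Int) - 1 - i := by omega
      rw [hcast] at this
      have hm'cast : ((m' : Nat) : Int) = (P.length : Int) - i - 2 := by omega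
      omega
    -- the updated list is the next mix (in both branches)
    have h1 : P.length - i = (m' + 1) + 1 := by omega
    have hpackcons : pvPack (P.length - i) last = (last - ((m' : Int) + 1)) :: pvPack (m' + 1) last := by
      rw [h1]
      show pvPack ((m'+1)+1) last = _
      rfl
    have hmixeq : ∀ x : Int, x = last - (m' : Int) - 1 →
        P.take i ++ [x] ++ pvPack (P.length - (i+1)) last
          = P.take i ++ pvPack (P.length - i) last := by
      intro x hx
      rw [hm, hpackcons, List.append_assoc, List.singleton_append, hx]
      congr 2
      ring
    have hmixset : (P.take (i+1) ++ pvPack (P.length - (i+1)) last).set i (last - (m' : Int) - 1)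
        = P.take i ++ pvPack (P.length - i) last := by
      rw [List.set_append_left _ _ (by omega : i < (P.take (i+1)).length), hsucc,
        List.set_append_right _ _ (by simp : (P.take i).length ≤ i)]
      have h2 : i - (P.take i).length = 0 := by simp only [List.length_take]; omega
      rw [h2, List.set_cons_zero]
      exact hmixeq _ rfl
    have hgsum : pvGsum (P.take (i+1)) (last - P.length + 2)
        = pvGsum (P.take i) (last - P.length + 2)
          + (if (last - m') - P[i] > 1 then (last - m') - P[i] else 0) := by
      rw [hsucc, pvGsum_snoc]
      have hlen : ((P.take i).length : Int) = i := by simp; omega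
      rw [hlen]
      have harg : last - P.length + 2 + i - P[i] = (last - m') - P[i] := by
        have : ((m' : Nat) : Int) = (P.length : Int) - i - 2 := by omega
        omega
      rw [harg]
    simp only [pvPhase1, hget1, hget0]
    by_cases hc : last - (m' : Int) - P[i] > 1
    · rw [if_pos hc, hmixset, ih (by omega), hgsum, if_pos hc, Prod.mk.injEq]
      exact ⟨rfl, by ring⟩
    · rw [if_neg hc]
      have heq : P[i] = last - (m' : Int) - 1 := by omega
      have hsame : P.take (i+1) ++ pvPack (P.length - (i+1)) last
          = P.take i ++ pvPack (P.length - i) last := by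
        rw [hsucc]
        exact hmixeq _ heq
      rw [hsame, ih (by omega), hgsum, if_neg hc]
      simp

lemma pvMix_top (P : List Int) (hne : P ≠ []) :
    P.take (P.length - 1) ++ pvPack (P.length - (P.length - 1)) (P.getLast hne) = P := by
  have h1 : P.length - (P.length - 1) = 1 := by
    have := List.length_pos_of_ne_nil hne
    omega
  rw [h1]
  have : pvPack 1 (P.getLast hne) = [P.getLast hne] := by simp [pvPack]
  rw [this, ← List.dropLast_eq_take, List.dropLast_append_getLast hne]

-- the common core: A's two phases equal B's closed form + forward scan, for any strictly increasing P
lemma pvCore (n : Int) (P : List Int) (hP : P.Pairwise (· < ·)) :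
    (if P = [] then (0:Int) else
      pvPhase2 (pvPhase1 P (P.length - 1) 0).1 (n - 1) (pvPhase1 P (P.length - 1) 0).2)
    = (if P = [] then (0:Int) else
      pvBLoop (PySem.List.slice P none (some (-1)))
        (PySem.List.pyGetD P (-1) 0 - P.length + 2)
        (P.length * (n - PySem.List.pyGetD P (-1) 0))) := by
  by_cases hne : P = []
  · rw [if_pos hne, if_pos hne]
  · rw [if_neg hne, if_neg hne]
    have hlast := PySem.List.pyGetD_neg_one P 0 hne
    have hlen : 0 < P.length := List.length_pos_of_ne_nil hne
    have h1 := pvPhase1_inv P hP hne (P.length - 1) (by omega) 0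
    rw [pvMix_top P hne] at h1
    simp only [h1]
    rw [pvPhase2_pack, hlast, PySem.List.slice_to_neg_one, pvBLoop_eq, List.dropLast_eq_take]
    ring

-- ===== VERDICT (by name: the statement is the Claim_ definition above) =====
theorem get_max_cost_spec : Claim_equal_get_max_cost := by
  intro s _
  show get_max_cost s = get_max_cost_alt s
  exact pvCore (PySem.Str.len s) _
    (List.Pairwise.filter _ (PySem.List.pairwise_lt_pyRange_one 0 (PySem.Str.len s)))
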